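-- pv_equiv track=rewrite | github.com/jonas-jr/talentboost-hackathon | talent_boost_core/collaborative_filter.py | _same_cargo_family
-- ===== SOURCE A (Python) =====
-- def _same_cargo_family(cargo1: str, cargo2: str) -> bool:
--     """Verifica se dois cargos são da mesma família."""
--     cargo1_lower = cargo1.lower()
--     cargo2_lower = cargo2.lower()
--
--     families = [
--         ["desenvolvedor", "developer", "dev", "programador"],
--         ["analista", "analyst"],
--         ["gerente", "gestor", "manager"],
--         ["designer", "design"],
--     ]
--
--     for family in families:
--         if any(term in cargo1_lower for term in family) and any(
--             term in cargo2_lower for term in family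
--         ):
--             return True
--
--     return False
-- ===== SOURCE B (Python) =====
-- # B: text-driven multi-pattern scan. Instead of testing each family term against the
-- # title ("term in s"), B walks the lowered title position by position and looks the
-- # candidate substrings (one per distinct term length) up in a term->family dict,
-- # collecting the set of matched family ids; the answer is whether the two sets meet.
-- _FAMILIES = [
--     ["desenvolvedor", "developer", "dev", "programador"],
--     ["analista", "analyst"],
--     ["gerente", "gestor", "manager"],
--     ["designer", "design"],
-- ]
--
-- _TERM_FAM = {term: i for i, fam in enumerate(_FAMILIES) for term in fam}
-- _LENS = sorted({len(t) for t in _TERM_FAM})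
--
--
-- def _family_ids(s):
--     """Scan the text once; at each position look candidate substrings up."""
--     ids = set()
--     for i in range(len(s)):
--         for L in _LENS:
--             fam = _TERM_FAM.get(s[i:i + L])
--             if fam is not None:
--                 ids.add(fam)
--     return ids
--
--
-- def _same_cargo_family(cargo1: str, cargo2: str) -> bool:
--     return not _family_ids(cargo1.lower()).isdisjoint(_family_ids(cargo2.lower()))
-- ===== Notes on version B (the rewrite author's own statement) =====
-- stated objective: alternative
-- what changed: B replaces A's per-family 'term in title' containment scans by a text-driven multi-pattern matcher: it walks each lowered title position by position, looks the candidate substrings (one per distinct term length) up in a precomputed term-to-family dictionary, collects the set of matched family ids per title, and answers whether the two sets intersect.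
import Mathlib
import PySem

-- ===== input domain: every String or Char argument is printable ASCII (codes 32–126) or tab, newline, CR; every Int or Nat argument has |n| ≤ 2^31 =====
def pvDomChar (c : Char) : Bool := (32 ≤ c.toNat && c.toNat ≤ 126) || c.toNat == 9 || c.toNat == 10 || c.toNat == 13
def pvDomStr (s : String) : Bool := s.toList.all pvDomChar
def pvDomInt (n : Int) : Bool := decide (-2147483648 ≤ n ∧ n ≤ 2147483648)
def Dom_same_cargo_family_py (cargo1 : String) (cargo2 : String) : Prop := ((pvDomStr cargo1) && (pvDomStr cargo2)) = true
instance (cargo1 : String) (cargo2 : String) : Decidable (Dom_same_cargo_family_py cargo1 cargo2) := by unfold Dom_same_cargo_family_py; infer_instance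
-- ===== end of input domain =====

-- B replaces A's per-family substring containment scans by a text-driven scan that looks
-- candidate substrings up in a term->family dictionary and intersects the matched-id sets.


-- the literal family table both Pythons carry
def pvFamilies : List (List String) :=
  [["desenvolvedor", "developer", "dev", "programador"],
   ["analista", "analyst"],
   ["gerente", "gestor", "manager"],
   ["designer", "design"]]

-- ===== PORT A =====
-- A's for-loop over families: return True on the first family matching both titles
def pvLoopA (c1 c2 : String) : List (List String) → Bool
  | [] => false
  | f :: rest =>
      if (f.any (fun term => PySem.Str.isIn term c1)) && (f.any (fun term => PySem.Str.isIn term c2)) then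
        true
      else pvLoopA c1 c2 rest

def same_cargo_family_py (cargo1 : String) (cargo2 : String) : Bool :=
  pvLoopA (PySem.Str.lower cargo1) (PySem.Str.lower cargo2) pvFamilies

-- ===== PORT B =====
-- _TERM_FAM = {term: i for i, fam in enumerate(_FAMILIES) for term in fam}
-- (strings handled as their code-point lists, PySem.Chars being the definitions)
def pvTermFam : PySem.Dict (List Char) Int :=
  (PySem.List.enumerate pvFamilies 0).foldl
    (fun d p => p.2.foldl (fun d term => d.insert term.toList p.1) d) PySem.Dict.empty

-- _LENS = sorted({len(t) for t in _TERM_FAM}); Python's non-negative len kept as Nat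
def pvLens : List Nat :=
  PySem.List.sorted (PySem.Set.ofList (pvTermFam.keys.map List.length)) (fun L => L) false

-- body of _family_ids' nested loop: one dict lookup of s[i:i+L], adding the hit (if any)
def pvStep (s : List Char) (i : Nat) (ids : PySem.Set Int) (L : Nat) : PySem.Set Int :=
  match pvTermFam.get? (PySem.List.slice s (some (i : Int)) (some ((i : Int) + (L : Int)))) with
  | some fam => PySem.Set.add ids fam
  | none => ids

-- _family_ids(s): scan the text once, looking candidate substrings up at each position
def pvFamilyIds (s : List Char) : PySem.Set Int :=
  (List.range s.length).foldl (fun ids i => pvLens.foldl (pvStep s i) ids) PySem.Set.empty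

def same_cargo_family_py_alt (cargo1 : String) (cargo2 : String) : Bool :=
  !(PySem.Set.isdisjoint (pvFamilyIds (PySem.Str.lower cargo1).toList)
                         (pvFamilyIds (PySem.Str.lower cargo2).toList))

-- ===== PRECONDITION & SPEC =====
def Spec_same_cargo_family_py (cargo1 : String) (cargo2 : String) (out : Bool) : Prop := out = same_cargo_family_py_alt cargo1 cargo2
instance (cargo1 : String) (cargo2 : String) (out : Bool) : Decidable (Spec_same_cargo_family_py cargo1 cargo2 out) := by unfold Spec_same_cargo_family_py; infer_instance

-- ===== CLAIM (what is proved, stated in full; the proofs are below) =====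
def Claim_equal_same_cargo_family_py : Prop := ∀ (cargo1 : String) (cargo2 : String), Dom_same_cargo_family_py cargo1 cargo2 → Spec_same_cargo_family_py cargo1 cargo2 (same_cargo_family_py cargo1 cargo2)

-- ===== LEMMAS AND PROOFS =====

-- dict lookup succeeds iff the slice is one of the 11 (term, family) items
lemma get?_termFam_iff (k : List Char) (y : Int) :
    pvTermFam.get? k = some y ↔ (k, y) ∈ pvTermFam.items := by
  exact PySem.Dict.get?_eq_some_iff_mem_items _ _ _ (by decide)

-- every stored term is nonempty and its length is one of the probed lengths
lemma termFam_items_facts :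
    ∀ p ∈ pvTermFam.items, p.1 ≠ [] ∧ p.1.length ∈ pvLens := by decide

-- inner loop over the candidate lengths, membership characterisation
lemma mem_inner (s : List Char) (i : Nat) (lens : List Nat) (ids : PySem.Set Int) (y : Int) :
    y ∈ lens.foldl (pvStep s i) ids ↔
      y ∈ ids ∨ ∃ L ∈ lens,
        pvTermFam.get? (PySem.List.slice s (some (i : Int)) (some ((i : Int) + (L : Int)))) = some y := by
  induction lens generalizing ids with
  | nil => simp
  | cons L rest ih =>
      simp only [List.foldl_cons]
      rw [ih]
      unfold pvStep
      cases h : pvTermFam.get? (PySem.List.slice s (some (i : Int)) (some ((i : Int) + (L : Int)))) with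
      | none =>
          constructor
          · rintro (hy | ⟨L', hL', hg⟩)
            · exact Or.inl hy
            · exact Or.inr ⟨L', List.mem_cons_of_mem _ hL', hg⟩
          · rintro (hy | ⟨L', hL', hg⟩)
            · exact Or.inl hy
            · rcases List.mem_cons.mp hL' with rfl | hL'
              · rw [h] at hg; cases hg
              · exact Or.inr ⟨L', hL', hg⟩
      | some fam =>
          rw [PySem.Set.mem_add]
          constructor
          · rintro ((hy | rfl) | ⟨L', hL', hg⟩)
            · exact Or.inl hy
            · exact Or.inr ⟨L, List.mem_cons_self .., h⟩
            · exact Or.inr ⟨L', List.mem_cons_of_mem _ hL', hg⟩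
          · rintro (hy | ⟨L', hL', hg⟩)
            · exact Or.inl (Or.inl hy)
            · rcases List.mem_cons.mp hL' with rfl | hL'
              · rw [h] at hg; exact Or.inl (Or.inr (Option.some.inj hg).symm)
              · exact Or.inr ⟨L', hL', hg⟩

-- outer loop over the positions, membership characterisation
lemma mem_outer (s : List Char) (ps : List Nat) (ids : PySem.Set Int) (y : Int) :
    y ∈ ps.foldl (fun ids i => pvLens.foldl (pvStep s i) ids) ids ↔
      y ∈ ids ∨ ∃ i ∈ ps, ∃ L ∈ pvLens,
        pvTermFam.get? (PySem.List.slice s (some (i : Int)) (some ((i : Int) + (L : Int)))) = some y := by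
  induction ps generalizing ids with
  | nil => simp
  | cons i rest ih =>
      simp only [List.foldl_cons]
      rw [ih, mem_inner]
      constructor
      · rintro ((hy | hg) | ⟨i', hi', hg⟩)
        · exact Or.inl hy
        · exact Or.inr ⟨i, List.mem_cons_self .., hg⟩
        · exact Or.inr ⟨i', List.mem_cons_of_mem _ hi', hg⟩
      · rintro (hy | ⟨i', hi', hg⟩)
        · exact Or.inl (Or.inl hy)
        · rcases List.mem_cons.mp hi' with rfl | hi'
          · exact Or.inl (Or.inr hg)
          · exact Or.inr ⟨i', hi', hg⟩

-- the heart: a family id is collected iff one of its stored terms occurs in the text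
lemma mem_familyIds (s : List Char) (y : Int) :
    y ∈ pvFamilyIds s ↔ ∃ p ∈ pvTermFam.items, p.2 = y ∧ PySem.Chars.isIn p.1 s = true := by
  unfold pvFamilyIds
  rw [mem_outer]
  simp only [PySem.Set.empty, List.not_mem_nil, false_or, List.mem_range]
  constructor
  · rintro ⟨i, hi, L, hL, hg⟩
    refine ⟨_, (get?_termFam_iff _ y).mp hg, rfl, ?_⟩
    rw [← PySem.Chars.exists_prefix_drop_iff_isIn]
    refine ⟨i, ?_⟩
    rw [PySem.List.slice_natCast_add]
    exact List.take_prefix _ _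
  · rintro ⟨⟨t, f⟩, hmem, rfl, hin⟩
    obtain ⟨hne, hlen⟩ := termFam_items_facts _ hmem
    obtain ⟨j, hpre⟩ := (PySem.Chars.exists_prefix_drop_iff_isIn (sub := t) (s := s)).mpr hin
    have hj : j < s.length := by
      by_contra h
      rw [List.drop_eq_nil_of_le (by omega)] at hpre
      exact hne (List.prefix_nil.mp hpre)
    refine ⟨j, hj, t.length, hlen, ?_⟩
    rw [PySem.List.slice_natCast_add]
    rw [(get?_termFam_iff _ f)]
    have : (s.drop j).take t.length = t := (List.prefix_iff_eq_take.mp hpre).symm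
    rw [this]
    exact hmem

-- the dict's items, evaluated
lemma items_eq : pvTermFam.items =
    [("desenvolvedor".toList, 0), ("developer".toList, 0), ("dev".toList, 0), ("programador".toList, 0),
     ("analista".toList, 1), ("analyst".toList, 1),
     ("gerente".toList, 2), ("gestor".toList, 2), ("manager".toList, 2),
     ("designer".toList, 3), ("design".toList, 3)] := by decide

-- collected ids, spelled out per family
set_option maxHeartbeats 1000000 in
lemma mem_ids (c : List Char) (y : Int) :
    y ∈ pvFamilyIds c ↔
      (y = 0 ∧ (PySem.Chars.isIn "desenvolvedor".toList c ∨ PySem.Chars.isIn "developer".toList c ∨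
                PySem.Chars.isIn "dev".toList c ∨ PySem.Chars.isIn "programador".toList c)) ∨
      (y = 1 ∧ (PySem.Chars.isIn "analista".toList c ∨ PySem.Chars.isIn "analyst".toList c)) ∨
      (y = 2 ∧ (PySem.Chars.isIn "gerente".toList c ∨ PySem.Chars.isIn "gestor".toList c ∨
                PySem.Chars.isIn "manager".toList c)) ∨
      (y = 3 ∧ (PySem.Chars.isIn "designer".toList c ∨ PySem.Chars.isIn "design".toList c)) := by
  rw [mem_familyIds, items_eq]
  simp only [List.mem_cons, List.not_mem_nil, or_false]
  constructor
  · rintro ⟨⟨t, f⟩, hp, rfl, hin⟩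
    rcases hp with h|h|h|h|h|h|h|h|h|h|h <;>
      (injection h with h1 h2; subst h1; subst h2; tauto)
  · rintro (⟨rfl, h|h|h|h⟩ | ⟨rfl, h|h⟩ | ⟨rfl, h|h|h⟩ | ⟨rfl, h|h⟩) <;>
      first
      | exact ⟨_, .inl rfl, rfl, h⟩
      | exact ⟨_, .inr (.inl rfl), rfl, h⟩
      | exact ⟨_, .inr (.inr (.inl rfl)), rfl, h⟩
      | exact ⟨_, .inr (.inr (.inr (.inl rfl))), rfl, h⟩
      | exact ⟨_, .inr (.inr (.inr (.inr (.inl rfl)))), rfl, h⟩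
      | exact ⟨_, .inr (.inr (.inr (.inr (.inr (.inl rfl))))), rfl, h⟩
      | exact ⟨_, .inr (.inr (.inr (.inr (.inr (.inr (.inl rfl)))))), rfl, h⟩
      | exact ⟨_, .inr (.inr (.inr (.inr (.inr (.inr (.inr (.inl rfl))))))), rfl, h⟩
      | exact ⟨_, .inr (.inr (.inr (.inr (.inr (.inr (.inr (.inr (.inl rfl)))))))), rfl, h⟩
      | exact ⟨_, .inr (.inr (.inr (.inr (.inr (.inr (.inr (.inr (.inr (.inl rfl))))))))), rfl, h⟩
      | exact ⟨_, .inr (.inr (.inr (.inr (.inr (.inr (.inr (.inr (.inr (.inr rfl))))))))), rfl, h⟩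

-- A's loop returns True iff some listed family matches both titles
lemma loopA_iff (c1 c2 : String) (fs : List (List String)) :
    pvLoopA c1 c2 fs = true ↔
      ∃ f ∈ fs, f.any (fun t => PySem.Str.isIn t c1) = true ∧ f.any (fun t => PySem.Str.isIn t c2) = true := by
  induction fs with
  | nil => simp [pvLoopA]
  | cons f rest ih =>
      unfold pvLoopA
      split_ifs with h
      · simp only [true_iff]
        exact ⟨f, List.mem_cons_self .., by simpa using h⟩
      · rw [ih]
        constructor
        · rintro ⟨g, hg, h1, h2⟩; exact ⟨g, List.mem_cons_of_mem _ hg, h1, h2⟩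
        · rintro ⟨g, hg, h1, h2⟩
          rcases List.mem_cons.mp hg with rfl | hg
          · exact absurd (by rw [h1, h2]; rfl) h
          · exact ⟨g, hg, h1, h2⟩

-- a set intersection test, as an existential
lemma isdisjoint_false_iff (s t : PySem.Set Int) :
    PySem.Set.isdisjoint s t = false ↔ ∃ x ∈ s, x ∈ t := by
  rw [← Bool.not_eq_true, PySem.Set.isdisjoint_iff]
  simp only [not_forall, not_not, exists_prop]

-- ===== VERDICT (by name: the statement is the Claim_ definition above) =====
set_option maxHeartbeats 2000000 in
theorem same_cargo_family_py_spec : Claim_equal_same_cargo_family_py := by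
  intro cargo1 cargo2 _
  unfold Spec_same_cargo_family_py same_cargo_family_py same_cargo_family_py_alt
  rw [Bool.eq_iff_iff]
  set c1 := PySem.Str.lower cargo1
  set c2 := PySem.Str.lower cargo2
  rw [Bool.not_eq_true', isdisjoint_false_iff, loopA_iff]
  simp only [pvFamilies, List.mem_cons, List.not_mem_nil, or_false, exists_eq_or_imp,
    exists_eq_left, List.any_cons, List.any_nil, Bool.or_eq_true, Bool.or_false,
    PySem.Str.isIn_eq]
  simp only [mem_ids]
  constructor
  · rintro (⟨h1, h2⟩ | ⟨h1, h2⟩ | ⟨h1, h2⟩ | ⟨h1, h2⟩)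
    · exact ⟨0, Or.inl ⟨rfl, h1⟩, Or.inl ⟨rfl, h2⟩⟩
    · exact ⟨1, Or.inr (Or.inl ⟨rfl, h1⟩), Or.inr (Or.inl ⟨rfl, h2⟩)⟩
    · exact ⟨2, Or.inr (Or.inr (Or.inl ⟨rfl, h1⟩)), Or.inr (Or.inr (Or.inl ⟨rfl, h2⟩))⟩
    · exact ⟨3, Or.inr (Or.inr (Or.inr ⟨rfl, h1⟩)), Or.inr (Or.inr (Or.inr ⟨rfl, h2⟩))⟩
  · rintro ⟨x, hx1, hx2⟩
    rcases hx1 with ⟨rfl, h1⟩ | ⟨rfl, h1⟩ | ⟨rfl, h1⟩ | ⟨rfl, h1⟩ <;>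
      rcases hx2 with ⟨he, h2⟩ | ⟨he, h2⟩ | ⟨he, h2⟩ | ⟨he, h2⟩ <;>
      first
        | (exfalso; omega)
        | exact Or.inl ⟨h1, h2⟩
        | exact Or.inr (Or.inl ⟨h1, h2⟩)
        | exact Or.inr (Or.inr (Or.inl ⟨h1, h2⟩))
        | exact Or.inr (Or.inr (Or.inr ⟨h1, h2⟩))
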